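-- pv_equiv track=rewrite | github.com/bristmatt96-hub/apex-s44-monitor | apex_monitor.py | spot_pattern
-- ===== SOURCE A (Python) =====
-- def spot_pattern(name, text, sector):
--     """Analyze tweet for credit impact"""
--     txt = text.lower()
--
--     if any(w in txt for w in ['downgrade', 'negative outlook', 'rating cut']):
--         return "NEGATIVE: Rating pressure - expect CDS widening 10-30bps"
--     if any(w in txt for w in ['upgrade', 'positive outlook', 'rating raise']):
--         return "POSITIVE: Rating improvement - expect CDS tightening"
--     if any(w in txt for w in ['restructuring', 'bankruptcy', 'default']):
--         return "HIGH RISK: Restructuring signal - significant spread impact likely"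
--     if any(w in txt for w in ['acquisition', 'takeover', 'buyout', 'm&a']):
--         return "EVENT: M&A activity - monitor for leverage impact"
--     if any(w in txt for w in ['refinancing', 'bond issue', 'new debt']):
--         return "NEUTRAL: Refinancing activity - monitor terms"
--     if any(w in txt for w in ['antitrust', 'regulatory', 'investigation']):
--         return "RISK: Regulatory scrutiny - potential headline risk"
--     if sector == "Autos & Industrials":
--         if any(w in txt for w in ['tariff', 'ev', 'supply chain', 'chip shortage']):
--             return f"SECTOR: Auto/Industrial headwind - compare to sector peers"
--     if sector == "TMT":
--         if any(w in txt for w in ['spectrum', 'fiber', '5g', 'subscriber']):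
--             return "SECTOR: TMT operational signal"
--     return "MONITOR: Potential credit signal - requires analysis"
-- ===== SOURCE B (Python) =====
-- # Flat keyword->priority map; the answer is the MINIMUM priority among all
-- # matching keywords (no branch cascade, no early exit, order-independent).
-- _PRIORITY = {
--     'downgrade': 0, 'negative outlook': 0, 'rating cut': 0,
--     'upgrade': 1, 'positive outlook': 1, 'rating raise': 1,
--     'restructuring': 2, 'bankruptcy': 2, 'default': 2,
--     'acquisition': 3, 'takeover': 3, 'buyout': 3, 'm&a': 3,
--     'refinancing': 4, 'bond issue': 4, 'new debt': 4,
--     'antitrust': 5, 'regulatory': 5, 'investigation': 5,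
--     'tariff': 6, 'ev': 6, 'supply chain': 6, 'chip shortage': 6,
--     'spectrum': 7, 'fiber': 7, '5g': 7, 'subscriber': 7,
-- }
-- _GATES = {6: "Autos & Industrials", 7: "TMT"}
-- _RESULTS = [
--     "NEGATIVE: Rating pressure - expect CDS widening 10-30bps",
--     "POSITIVE: Rating improvement - expect CDS tightening",
--     "HIGH RISK: Restructuring signal - significant spread impact likely",
--     "EVENT: M&A activity - monitor for leverage impact",
--     "NEUTRAL: Refinancing activity - monitor terms",
--     "RISK: Regulatory scrutiny - potential headline risk",
--     "SECTOR: Auto/Industrial headwind - compare to sector peers",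
--     "SECTOR: TMT operational signal",
--     "MONITOR: Potential credit signal - requires analysis",
-- ]
--
-- def spot_pattern(name, text, sector):
--     """Analyze tweet for credit impact"""
--     txt = text.lower()
--     best = len(_RESULTS) - 1  # default: MONITOR
--     for kw, pri in _PRIORITY.items():
--         if pri < best and _GATES.get(pri, sector) == sector and kw in txt:
--             best = pri
--     return _RESULTS[best]
-- ===== Notes on version B (the rewrite author's own statement) =====
-- stated objective: alternative
-- what changed: Replaced the eight-branch first-match if-ladder with a min-reduction: every keyword carries a numeric priority in one flat map, the function takes the minimum priority among all matching (and sector-gated) keywords and indexes a result table, instead of cascading through ordered branches with early returns.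
import Mathlib
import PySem

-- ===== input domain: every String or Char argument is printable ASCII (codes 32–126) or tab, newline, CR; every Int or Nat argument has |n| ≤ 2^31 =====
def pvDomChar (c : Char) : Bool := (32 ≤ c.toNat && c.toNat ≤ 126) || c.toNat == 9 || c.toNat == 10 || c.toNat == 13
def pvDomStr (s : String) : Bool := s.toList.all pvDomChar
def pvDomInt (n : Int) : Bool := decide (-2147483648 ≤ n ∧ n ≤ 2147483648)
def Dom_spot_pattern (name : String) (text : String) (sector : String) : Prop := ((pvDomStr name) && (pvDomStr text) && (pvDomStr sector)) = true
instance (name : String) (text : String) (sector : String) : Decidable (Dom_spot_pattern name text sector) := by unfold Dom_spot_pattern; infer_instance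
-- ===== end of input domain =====

-- B replaces A's first-match if-ladder by a min-reduction over a flat keyword→priority map (alternative decomposition, same cost).
-- ===== PORT A =====
-- Transliteration of A's if-ladder; Python's `w in txt` is PySem.Str.isIn.
def spot_pattern (name : String) (text : String) (sector : String) : String :=
  let txt := PySem.Str.lower text
  if ["downgrade", "negative outlook", "rating cut"].any (fun w => PySem.Str.isIn w txt) then
    "NEGATIVE: Rating pressure - expect CDS widening 10-30bps"
  else if ["upgrade", "positive outlook", "rating raise"].any (fun w => PySem.Str.isIn w txt) then
    "POSITIVE: Rating improvement - expect CDS tightening"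
  else if ["restructuring", "bankruptcy", "default"].any (fun w => PySem.Str.isIn w txt) then
    "HIGH RISK: Restructuring signal - significant spread impact likely"
  else if ["acquisition", "takeover", "buyout", "m&a"].any (fun w => PySem.Str.isIn w txt) then
    "EVENT: M&A activity - monitor for leverage impact"
  else if ["refinancing", "bond issue", "new debt"].any (fun w => PySem.Str.isIn w txt) then
    "NEUTRAL: Refinancing activity - monitor terms"
  else if ["antitrust", "regulatory", "investigation"].any (fun w => PySem.Str.isIn w txt) then
    "RISK: Regulatory scrutiny - potential headline risk"
  else if sector == "Autos & Industrials" &&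
      ["tariff", "ev", "supply chain", "chip shortage"].any (fun w => PySem.Str.isIn w txt) then
    "SECTOR: Auto/Industrial headwind - compare to sector peers"
  else if sector == "TMT" &&
      ["spectrum", "fiber", "5g", "subscriber"].any (fun w => PySem.Str.isIn w txt) then
    "SECTOR: TMT operational signal"
  else
    "MONITOR: Potential credit signal - requires analysis"

-- ===== PORT B =====
-- B: flat keyword→priority map (dict in insertion order), sector gates, result table.
def pvPriority : List (String × Nat) :=
  [("downgrade", 0), ("negative outlook", 0), ("rating cut", 0),
   ("upgrade", 1), ("positive outlook", 1), ("rating raise", 1),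
   ("restructuring", 2), ("bankruptcy", 2), ("default", 2),
   ("acquisition", 3), ("takeover", 3), ("buyout", 3), ("m&a", 3),
   ("refinancing", 4), ("bond issue", 4), ("new debt", 4),
   ("antitrust", 5), ("regulatory", 5), ("investigation", 5),
   ("tariff", 6), ("ev", 6), ("supply chain", 6), ("chip shortage", 6),
   ("spectrum", 7), ("fiber", 7), ("5g", 7), ("subscriber", 7)]

def pvGates : PySem.Dict Nat String := PySem.Dict.ofList [(6, "Autos & Industrials"), (7, "TMT")]

def pvResults : List String :=
  ["NEGATIVE: Rating pressure - expect CDS widening 10-30bps",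
   "POSITIVE: Rating improvement - expect CDS tightening",
   "HIGH RISK: Restructuring signal - significant spread impact likely",
   "EVENT: M&A activity - monitor for leverage impact",
   "NEUTRAL: Refinancing activity - monitor terms",
   "RISK: Regulatory scrutiny - potential headline risk",
   "SECTOR: Auto/Industrial headwind - compare to sector peers",
   "SECTOR: TMT operational signal",
   "MONITOR: Potential credit signal - requires analysis"]

-- min-reduction: lowest priority among matching, sector-gated keywords; `_RESULTS[best]`
-- (best ≤ 8 < len(_RESULTS) always, so plain getD is exact here).
def spot_pattern_alt (name : String) (text : String) (sector : String) : String :=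
  let txt := PySem.Str.lower text
  let best := pvPriority.foldl
    (fun best p =>
      if decide (p.2 < best) &&
          (PySem.Dict.getD pvGates p.2 sector == sector && PySem.Str.isIn p.1 txt)
        then p.2 else best)
    (pvResults.length - 1)
  pvResults.getD best ""

-- ===== PRECONDITION & SPEC =====
def Spec_spot_pattern (name : String) (text : String) (sector : String) (out : String) : Prop := out = spot_pattern_alt name text sector
instance (name : String) (text : String) (sector : String) (out : String) : Decidable (Spec_spot_pattern name text sector out) := by unfold Spec_spot_pattern; infer_instance

-- ===== CLAIM (what is proved, stated in full; the proofs are below) =====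
def Claim_equal_spot_pattern : Prop := ∀ (name : String) (text : String) (sector : String), Dom_spot_pattern name text sector → Spec_spot_pattern name text sector (spot_pattern name text sector)

-- ===== LEMMAS AND PROOFS =====

-- the fold's step function, abstracted over the per-element test f
def pvStep (f : String × Nat → Bool) (best : Nat) (p : String × Nat) : Nat :=
  if decide (p.2 < best) && f p then p.2 else best

-- first fired element's priority, default d
def pvFirstF (f : String × Nat → Bool) (d : Nat) : List (String × Nat) → Nat
  | [] => d
  | p :: r => if f p then p.2 else pvFirstF f d r

theorem pv_foldl_stable (f : String × Nat → Bool) (L : List (String × Nat)) (best : Nat)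
    (h : ∀ p ∈ L, ¬ p.2 < best) : L.foldl (pvStep f) best = best := by
  induction L with
  | nil => rfl
  | cons p r ih =>
    have hp := h p (by simp)
    simp only [List.foldl_cons, pvStep]
    rw [if_neg (by simp [hp])]
    exact ih (fun q hq => h q (by simp [hq]))

theorem pv_foldl_firstF (f : String × Nat → Bool) (L : List (String × Nat)) (best : Nat)
    (hs : L.Pairwise (fun p q => p.2 ≤ q.2)) (hb : ∀ p ∈ L, p.2 < best) :
    L.foldl (pvStep f) best = pvFirstF f best L := by
  induction L generalizing best with
  | nil => rfl
  | cons p r ih =>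
    simp only [List.foldl_cons, pvFirstF]
    rcases List.pairwise_cons.mp hs with ⟨hpr, hr⟩
    by_cases hf : f p = true
    · rw [if_pos hf]
      have : pvStep f best p = p.2 := by
        simp [pvStep, hf, hb p (by simp)]
      rw [this]
      exact pv_foldl_stable f r p.2 (fun q hq => Nat.not_lt.mpr (hpr q hq))
    · rw [if_neg hf]
      have : pvStep f best p = best := by simp [pvStep, hf]
      rw [this]
      exact ih best hr (fun q hq => hb q (by simp [hq]))

theorem pv_if_or (a b : Bool) (x y : String) :
    (if (a || b) = true then x else y) = if a = true then x else if b = true then x else y := by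
  cases a <;> simp

theorem pv_beq_comm (a b : String) : (a == b) = (b == a) := by
  by_cases h : a = b <;> simp_all ; exact fun e => h e.symm

-- ===== VERDICT (by name: the statement is the Claim_ definition above) =====
set_option maxHeartbeats 4000000 in
theorem spot_pattern_spec : Claim_equal_spot_pattern := by
  intro name text sector _
  unfold Spec_spot_pattern spot_pattern spot_pattern_alt
  have hfold := pv_foldl_firstF
    (fun p => PySem.Dict.getD pvGates p.2 sector == sector
      && PySem.Str.isIn p.1 (PySem.Str.lower text))
    pvPriority (pvResults.length - 1) (by decide) (by decide)
  dsimp only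
  have hstep : (fun (best : Nat) (p : String × Nat) =>
      if decide (p.2 < best) &&
          (PySem.Dict.getD pvGates p.2 sector == sector && PySem.Str.isIn p.1 (PySem.Str.lower text))
        then p.2 else best)
      = pvStep (fun p => PySem.Dict.getD pvGates p.2 sector == sector
          && PySem.Str.isIn p.1 (PySem.Str.lower text)) := rfl
  rw [hstep, hfold]
  simp only [pvPriority, pvFirstF]
  have g0 : pvGates.getD 0 sector = sector := rfl
  have g1 : pvGates.getD 1 sector = sector := rfl
  have g2 : pvGates.getD 2 sector = sector := rfl
  have g3 : pvGates.getD 3 sector = sector := rfl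
  have g4 : pvGates.getD 4 sector = sector := rfl
  have g5 : pvGates.getD 5 sector = sector := rfl
  have g6 : pvGates.getD 6 sector = "Autos & Industrials" := rfl
  have g7 : pvGates.getD 7 sector = "TMT" := rfl
  simp only [g0, g1, g2, g3, g4, g5, g6, g7, beq_self_eq_true, Bool.true_and]
  simp only [List.any_cons, List.any_nil, Bool.or_false]
  simp only [pv_beq_comm sector]
  simp only [Bool.and_or_distrib_left]
  simp only [pv_if_or]
  simp only [apply_ite (fun k : Nat => pvResults.getD k "")]
  rfl
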